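-- pv_equiv track=rewrite | github.com/iyxxnjin/Algorithm | 프로그래머스/2/42586. 기능개발/기능개발.py | solution
-- ===== SOURCE A (Python) =====
-- def solution(progresses, speeds):
--     release = []
--     i = 0
--
--     while i < len(progresses):
--         day = 0
--         count = 0
--         while progresses[i] + speeds[i] * day < 100 :
--             day += 1
--
--         while i < len(progresses) and progresses[i] + speeds[i] * day >= 100:
--             count += 1
--             i += 1
--
--         release.append(count)
--
--     return release
-- ===== SOURCE B (Python) =====
-- def solution(progresses, speeds):
--     # finish day of each task: integer ceiling of (100 - p) / s (0 if already complete)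
--     days = [0 if p >= 100 else -(-(100 - p) // s) for p, s in zip(progresses, speeds)]
--     if not days:
--         return []
--     out = []
--     threshold, count = days[0], 1
--     for d in days[1:]:
--         if d <= threshold:
--             count += 1
--         else:
--             out.append(count)
--             threshold, count = d, 1
--     out.append(count)
--     return out
-- ===== Notes on version B (the rewrite author's own statement) =====
-- stated objective: simpler
-- what changed: Replaces A's per-task day-counting loop and index-walking inner scan with a closed-form integer-ceiling finish-day list followed by one forward grouping pass.
-- outside the precondition, e.g. on solution([0, 100], [50, -1]): A returns [1, 1], B returns [2]; on solution([50], []): A raises IndexError, B returns []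
import Mathlib
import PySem

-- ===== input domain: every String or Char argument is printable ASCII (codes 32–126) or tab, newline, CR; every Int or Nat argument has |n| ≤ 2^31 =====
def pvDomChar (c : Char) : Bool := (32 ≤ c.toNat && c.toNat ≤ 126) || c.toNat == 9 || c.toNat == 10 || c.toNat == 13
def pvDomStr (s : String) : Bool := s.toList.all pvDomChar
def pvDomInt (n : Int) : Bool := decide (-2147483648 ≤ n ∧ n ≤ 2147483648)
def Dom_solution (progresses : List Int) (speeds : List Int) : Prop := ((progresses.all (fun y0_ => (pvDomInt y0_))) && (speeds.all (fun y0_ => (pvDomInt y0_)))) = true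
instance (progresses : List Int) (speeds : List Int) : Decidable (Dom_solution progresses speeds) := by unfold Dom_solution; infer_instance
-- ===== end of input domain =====

-- B replaces A's per-task day-counting loop and index-walking inner scan with a
-- closed-form integer-ceiling finish-day list and one forward grouping pass (simpler decomposition).


-- ===== PORT A =====
-- 'while progresses[i] + speeds[i] * day < 100: day += 1' — fuel only makes the
-- unbounded search total; under Pre_ (0 < s) and Dom (|p| ≤ 2^31) the loop exits within the fuel.
def pvDayLoop (p s : Int) : Nat → Int → Int
  | fuel, day =>
    if p + s * day < 100 then
      match fuel with
      | 0 => day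
      | f + 1 => pvDayLoop p s f (day + 1)
    else day

-- 'while i < len(progresses) and progresses[i] + speeds[i] * day >= 100: count += 1; i += 1'
-- returns the final (i, count); 'none' from pyGet? is Python's IndexError (outside Pre_).
def pvInnerLoop (ps ss : List Int) (day : Int) : Nat → Nat → Int → Nat × Int
  | fuel, i, count =>
    if i < ps.length then
      match PySem.List.pyGet? ps (i : Int), PySem.List.pyGet? ss (i : Int) with
      | some p, some s =>
        if p + s * day ≥ 100 then
          match fuel with
          | 0 => (i, count)
          | f + 1 => pvInnerLoop ps ss day f (i + 1) (count + 1)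
        else (i, count)
      | _, _ => (i, count)
    else (i, count)

-- outer 'while i < len(progresses)' loop; fuel ps.length + 1 suffices since i strictly increases.
def pvOuterLoop (ps ss : List Int) : Nat → Nat → List Int → List Int
  | 0, _, release => release
  | fuel + 1, i, release =>
    if i < ps.length then
      match PySem.List.pyGet? ps (i : Int), PySem.List.pyGet? ss (i : Int) with
      | some p, some s =>
        let day := pvDayLoop p s 4294967397 0
        let r := pvInnerLoop ps ss day ps.length i 0
        pvOuterLoop ps ss fuel r.1 (release ++ [r.2])
      | _, _ => release   -- IndexError (speeds shorter than progresses); outside Pre_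
    else release

def solution (progresses : List Int) (speeds : List Int) : List Int :=
  pvOuterLoop progresses speeds (progresses.length + 1) 0 []

-- ===== PORT B =====
-- finish day of one task: 0 if p >= 100 else -(-(100 - p) // s)
def pvFinishDay (p s : Int) : Int :=
  if p ≥ 100 then 0 else -(PySem.Int.floordiv (-(100 - p)) s)

-- the 'for d in days[1:]' grouping loop, as a foldl over (out, threshold, count)
def pvStep (acc : List Int × Int × Int) (d : Int) : List Int × Int × Int :=
  if d ≤ acc.2.1 then (acc.1, acc.2.1, acc.2.2 + 1) else (acc.1 ++ [acc.2.2], d, 1)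

def solution_alt (progresses : List Int) (speeds : List Int) : List Int :=
  let days := (progresses.zip speeds).map (fun x => pvFinishDay x.1 x.2)
  match days with
  | [] => []
  | d0 :: rest =>
    let r := rest.foldl pvStep ([], d0, 1)
    r.1 ++ [r.2.2]

-- ===== PRECONDITION & SPEC =====
-- Pre_ excludes non-positive speeds — A's day loop diverges for any unfinished task with s ≤ 0,
-- and whether an already-finished task with s ≤ 0 joins the current group depends on the leader's
-- wait day, an accidental corner of A — and progresses longer than speeds (IndexError).
def Pre_solution (progresses : List Int) (speeds : List Int) : Prop :=
  progresses.length ≤ speeds.length ∧ ∀ x ∈ progresses.zip speeds, 0 < x.2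
instance (progresses : List Int) (speeds : List Int) : Decidable (Pre_solution progresses speeds) := by
  unfold Pre_solution; infer_instance
def pvWitness_solution : List Int × List Int := ([93, 30, 55, 60, 40, 95], [1, 30, 5, 5, 20, 4])

def Spec_solution (progresses : List Int) (speeds : List Int) (out : List Int) : Prop := out = solution_alt progresses speeds
instance (progresses : List Int) (speeds : List Int) (out : List Int) : Decidable (Spec_solution progresses speeds out) := by unfold Spec_solution; infer_instance

-- ===== CLAIM (what is proved, stated in full; the proofs are below) =====
def Claim_equal_solution : Prop := ∀ (progresses : List Int) (speeds : List Int), Dom_solution progresses speeds → Pre_solution progresses speeds → Spec_solution progresses speeds (solution progresses speeds)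

-- ===== LEMMAS AND PROOFS =====

-- spec-level grouping recursion both ports are reduced to
def pvGroupsAux : List Int → Int → Int → List Int
  | [], _, count => [count]
  | d :: rest, thr, count =>
    if d ≤ thr then pvGroupsAux rest thr (count + 1) else count :: pvGroupsAux rest d 1

def pvGroups : List Int → List Int
  | [] => []
  | d :: rest => pvGroupsAux rest d 1

-- characterisation of pvFinishDay for 0 < s : d* brackets 100 - p
theorem pvFinishDay_bracket (p s : Int) (hs : 0 < s) (hp : ¬ p ≥ 100) :
    (pvFinishDay p s - 1) * s < 100 - p ∧ 100 - p ≤ pvFinishDay p s * s := by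
  have h := (PySem.Int.neg_floordiv_neg_eq_iff_of_pos (a := 100 - p) (b := s)
      (q := -(PySem.Int.floordiv (-(100 - p)) s)) hs).mp rfl
  simp only [pvFinishDay, if_neg hp]
  exact h

theorem pvFinishDay_nonneg (p s : Int) (hs : 0 < s) : 0 ≤ pvFinishDay p s := by
  by_cases hp : p ≥ 100
  · simp [pvFinishDay, hp]
  · have h := pvFinishDay_bracket p s hs hp
    nlinarith [h.1, h.2]

-- the day condition of A is exactly 'finish day ≤ d'
theorem pvCond_iff (p s d : Int) (hs : 0 < s) (hd : 0 ≤ d) :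
    (p + s * d ≥ 100) ↔ pvFinishDay p s ≤ d := by
  by_cases hp : p ≥ 100
  · simp only [pvFinishDay, if_pos hp]
    constructor
    · intro _; exact hd
    · intro _; nlinarith
  · have h := pvFinishDay_bracket p s hs hp
    constructor
    · intro hcond
      by_contra hlt
      push Not at hlt
      nlinarith [h.1]
    · intro hle
      nlinarith [h.2]

theorem pvFinishDay_le (p s : Int) (hs : 0 < s) (hp : -2147483648 ≤ p) :
    pvFinishDay p s ≤ 4294967397 := by
  by_cases hge : p ≥ 100
  · simp [pvFinishDay, hge]
  · have hd : (0 : Int) ≤ 100 - p := by omega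
    have : p + s * (100 - p) ≥ 100 := by nlinarith
    have := (pvCond_iff p s (100 - p) hs hd).mp this
    omega

-- the day loop computes pvFinishDay given enough fuel
theorem pvDayLoop_eq (p s : Int) (hs : 0 < s) :
    ∀ (fuel : Nat) (day : Int), 0 ≤ day → day ≤ pvFinishDay p s →
      pvFinishDay p s - day ≤ (fuel : Int) → pvDayLoop p s fuel day = pvFinishDay p s := by
  intro fuel
  induction fuel with
  | zero =>
    intro day h0 hle hf
    have hday : day = pvFinishDay p s := by omega
    have : ¬ (p + s * day < 100) := by
      have := (pvCond_iff p s day hs h0).mpr (by omega)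
      omega
    rw [pvDayLoop, if_neg this, hday]
  | succ f ih =>
    intro day h0 hle hf
    by_cases heq : day = pvFinishDay p s
    · have : ¬ (p + s * day < 100) := by
        have := (pvCond_iff p s day hs h0).mpr (by omega)
        omega
      rw [pvDayLoop, if_neg this, heq]
    · have hlt : day < pvFinishDay p s := by omega
      have hcond : p + s * day < 100 := by
        by_contra hc
        push Not at hc
        have := (pvCond_iff p s day hs h0).mp hc
        omega
      rw [pvDayLoop, if_pos hcond]
      exact ih (day + 1) (by omega) (by omega) (by push_cast at hf ⊢; omega)

def pvDays (ps ss : List Int) : List Int :=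
  (ps.zip ss).map (fun x => pvFinishDay x.1 x.2)

theorem pvDays_length (ps ss : List Int) (h : ps.length ≤ ss.length) :
    (pvDays ps ss).length = ps.length := by
  simp [pvDays, h]

theorem pvDays_getElem (ps ss : List Int) (h : ps.length ≤ ss.length) (i : Nat)
    (hi : i < (pvDays ps ss).length) (hi' : i < ps.length) (hi'' : i < ss.length) :
    (pvDays ps ss)[i] = pvFinishDay ps[i] ss[i] := by
  simp [pvDays]

-- drop past the takeWhile prefix is dropWhile
theorem pvDropTake (p : Int → Bool) : ∀ (l : List Int),
    l.drop (l.takeWhile p).length = l.dropWhile p := by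
  intro l
  induction l with
  | nil => rfl
  | cons d rest ih =>
    by_cases hd : p d = true
    · simp [List.takeWhile_cons, List.dropWhile_cons, hd, ih]
    · simp [List.takeWhile_cons, List.dropWhile_cons, hd]

-- pvGroupsAux in terms of takeWhile / dropWhile
theorem pvGroupsAux_eq : ∀ (l : List Int) (thr count : Int),
    pvGroupsAux l thr count =
      (count + ((l.takeWhile (fun x => decide (x ≤ thr))).length : Int)) ::
        pvGroups (l.dropWhile (fun x => decide (x ≤ thr))) := by
  intro l
  induction l with
  | nil => intro thr count; simp [pvGroupsAux, pvGroups]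
  | cons d rest ih =>
    intro thr count
    by_cases hd : d ≤ thr
    · rw [pvGroupsAux, if_pos hd, ih]
      simp [List.takeWhile_cons, List.dropWhile_cons, hd]
      omega
    · rw [pvGroupsAux, if_neg hd]
      simp [pvGroups, List.takeWhile_cons, List.dropWhile_cons, hd]

-- inner loop consumes exactly the takeWhile prefix of the remaining days
theorem pvInner_eq (ps ss : List Int) (hlen : ps.length ≤ ss.length)
    (hpos : ∀ x ∈ ps.zip ss, 0 < x.2) (d : Int) (hd : 0 ≤ d) :
    ∀ (fuel i : Nat) (count : Int), ps.length - i ≤ fuel →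
      pvInnerLoop ps ss d fuel i count =
        (i + (((pvDays ps ss).drop i).takeWhile (fun x => decide (x ≤ d))).length,
         count + ((((pvDays ps ss).drop i).takeWhile (fun x => decide (x ≤ d))).length : Int)) := by
  intro fuel
  induction fuel with
  | zero =>
    intro i count h
    have hdrop : (pvDays ps ss).drop i = [] :=
      List.drop_eq_nil_of_le (by rw [pvDays_length ps ss hlen]; omega)
    rw [pvInnerLoop, if_neg (by omega)]
    simp [hdrop]
  | succ f ih =>
    intro i count h
    by_cases hi : i < ps.length
    · have hiss : i < ss.length := lt_of_lt_of_le hi hlen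
      have hidays : i < (pvDays ps ss).length := by rw [pvDays_length ps ss hlen]; exact hi
      have hdrop : (pvDays ps ss).drop i = (pvDays ps ss)[i] :: (pvDays ps ss).drop (i + 1) :=
        List.drop_eq_getElem_cons hidays
      have hget : (pvDays ps ss)[i] = pvFinishDay ps[i] ss[i] :=
        pvDays_getElem ps ss hlen i hidays hi hiss
      have hs : 0 < ss[i] := by
        have hz : i < (ps.zip ss).length := by simp; omega
        have hmem : (ps[i], ss[i]) ∈ ps.zip ss := by
          have := List.getElem_mem hz
          rwa [List.getElem_zip] at this
        exact hpos _ hmem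
      have hp1 : PySem.List.pyGet? ps (i : Int) = some ps[i] := by
        rw [PySem.List.pyGet?_natCast]; exact List.getElem?_eq_getElem hi
      have hp2 : PySem.List.pyGet? ss (i : Int) = some ss[i] := by
        rw [PySem.List.pyGet?_natCast]; exact List.getElem?_eq_getElem hiss
      rw [pvInnerLoop, if_pos hi]
      simp only [hp1, hp2]
      by_cases hc : pvFinishDay ps[i] ss[i] ≤ d
      · have hcond : ps[i] + ss[i] * d ≥ 100 := (pvCond_iff _ _ d hs hd).mpr hc
        rw [if_pos hcond, ih (i + 1) (count + 1) (by omega)]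
        rw [hdrop, hget]
        simp only [List.takeWhile_cons, decide_eq_true_eq, hc, if_pos, List.length_cons,
          Prod.mk.injEq]
        refine ⟨by omega, by push_cast; ring⟩
      · have hcond : ¬ (ps[i] + ss[i] * d ≥ 100) := fun hc' => hc ((pvCond_iff _ _ d hs hd).mp hc')
        rw [if_neg hcond]
        rw [hdrop, hget]
        simp [List.takeWhile_cons, hc]
    · have hdrop : (pvDays ps ss).drop i = [] :=
        List.drop_eq_nil_of_le (by rw [pvDays_length ps ss hlen]; omega)
      rw [pvInnerLoop, if_neg hi]
      simp [hdrop]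

-- outer loop produces the grouping of the remaining days
theorem pvOuter_eq (ps ss : List Int) (hlen : ps.length ≤ ss.length)
    (hpos : ∀ x ∈ ps.zip ss, 0 < x.2) (hdom : ∀ p ∈ ps, -2147483648 ≤ p) :
    ∀ (fuel i : Nat) (release : List Int), ps.length - i < fuel →
      pvOuterLoop ps ss fuel i release = release ++ pvGroups ((pvDays ps ss).drop i) := by
  intro fuel
  induction fuel with
  | zero => intro i release h; omega
  | succ f ih =>
    intro i release h
    by_cases hi : i < ps.length
    · have hiss : i < ss.length := lt_of_lt_of_le hi hlen
      have hidays : i < (pvDays ps ss).length := by rw [pvDays_length ps ss hlen]; exact hi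
      have hdrop : (pvDays ps ss).drop i = (pvDays ps ss)[i] :: (pvDays ps ss).drop (i + 1) :=
        List.drop_eq_getElem_cons hidays
      have hget : (pvDays ps ss)[i] = pvFinishDay ps[i] ss[i] :=
        pvDays_getElem ps ss hlen i hidays hi hiss
      have hs : 0 < ss[i] := by
        have hz : i < (ps.zip ss).length := by simp; omega
        have hmem : (ps[i], ss[i]) ∈ ps.zip ss := by
          have := List.getElem_mem hz
          rwa [List.getElem_zip] at this
        exact hpos _ hmem
      have hp1 : PySem.List.pyGet? ps (i : Int) = some ps[i] := by
        rw [PySem.List.pyGet?_natCast]; exact List.getElem?_eq_getElem hi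
      have hp2 : PySem.List.pyGet? ss (i : Int) = some ss[i] := by
        rw [PySem.List.pyGet?_natCast]; exact List.getElem?_eq_getElem hiss
      have hpb : -2147483648 ≤ ps[i] := hdom _ (List.getElem_mem hi)
      have hday : pvDayLoop ps[i] ss[i] 4294967397 0 = pvFinishDay ps[i] ss[i] := by
        apply pvDayLoop_eq _ _ hs _ 0 le_rfl (pvFinishDay_nonneg _ _ hs)
        have := pvFinishDay_le ps[i] ss[i] hs hpb
        push_cast
        omega
      have hinner := pvInner_eq ps ss hlen hpos (pvFinishDay ps[i] ss[i])
        (pvFinishDay_nonneg _ _ hs) ps.length i 0 (by omega)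
      rw [pvOuterLoop]
      simp only [if_pos hi, hp1, hp2, hday, hinner]
      -- the head of the remaining days equals the leader's own finish day
      set t' := (((pvDays ps ss).drop (i + 1)).takeWhile
        (fun x => decide (x ≤ pvFinishDay ps[i] ss[i]))).length with ht'
      have htw : (((pvDays ps ss).drop i).takeWhile
          (fun x => decide (x ≤ pvFinishDay ps[i] ss[i]))).length = t' + 1 := by
        rw [hdrop, hget]
        simp [List.takeWhile_cons]
        omega
      rw [htw]
      rw [ih (i + (t' + 1)) (release ++ [0 + ((t' + 1 : Nat) : Int)]) (by omega)]
      have hgr : pvGroups ((pvDays ps ss).drop i) =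
          (1 + (t' : Int)) :: pvGroups ((pvDays ps ss).drop (i + (t' + 1))) := by
        rw [hdrop, hget]
        show pvGroupsAux ((pvDays ps ss).drop (i + 1)) (pvFinishDay ps[i] ss[i]) 1 = _
        rw [pvGroupsAux_eq,
          ← pvDropTake (fun x => decide (x ≤ pvFinishDay ps[i] ss[i])) ((pvDays ps ss).drop (i + 1)),
          List.drop_drop, ← ht']
        have hidx : i + 1 + t' = i + (t' + 1) := by omega
        rw [hidx]
      rw [hgr]
      have hv : (0 : Int) + ((t' + 1 : Nat) : Int) = 1 + (t' : Int) := by push_cast; ring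
      rw [hv]
      simp
    · rw [pvOuterLoop, if_neg hi]
      have hdrop : (pvDays ps ss).drop i = [] :=
        List.drop_eq_nil_of_le (by rw [pvDays_length ps ss hlen]; omega)
      simp [hdrop, pvGroups]

-- B's fold equals pvGroupsAux
theorem pvFold_eq : ∀ (l out : List Int) (thr count : Int),
    (l.foldl pvStep (out, thr, count)).1 ++ [(l.foldl pvStep (out, thr, count)).2.2] =
      out ++ pvGroupsAux l thr count := by
  intro l
  induction l with
  | nil => intro out thr count; simp [pvGroupsAux]
  | cons d rest ih =>
    intro out thr count
    by_cases hd : d ≤ thr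
    · simp only [List.foldl_cons, pvStep, if_pos hd]
      rw [ih]
      simp [pvGroupsAux, hd]
    · simp only [List.foldl_cons, pvStep, if_neg hd]
      rw [ih]
      simp [pvGroupsAux, hd, pvGroups]

theorem pvAlt_eq (ps ss : List Int) : solution_alt ps ss = pvGroups (pvDays ps ss) := by
  unfold solution_alt
  cases h : pvDays ps ss with
  | nil =>
    simp only [pvDays] at h
    rw [h]
    rfl
  | cons d0 rest =>
    simp only [pvDays] at h
    simp only [h]
    have := pvFold_eq rest [] d0 1
    simpa [pvGroups] using this

-- ===== VERDICT (by name: the statement is the Claim_ definition above) =====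
theorem solution_spec : Claim_equal_solution := by
  intro ps ss hDom hPre
  obtain ⟨hlen, hpos⟩ := hPre
  unfold Spec_solution
  have hdom : ∀ p ∈ ps, -2147483648 ≤ p := by
    unfold Dom_solution at hDom
    simp only [Bool.and_eq_true, List.all_eq_true, pvDomInt, decide_eq_true_eq] at hDom
    intro p hp; exact (hDom.1 p hp).1
  rw [pvAlt_eq]
  have := pvOuter_eq ps ss hlen hpos hdom (ps.length + 1) 0 [] (by omega)
  simpa [solution] using this
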